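-- pv_equiv track=rewrite | github.com/hoangvan1410/Minumate | backend/functions/transcript_chunker.py | _is_major_topic_shift
-- ===== SOURCE A (Python) =====
-- def _is_major_topic_shift(current_text: str, next_text: str) -> bool:
--     """Detect major shifts in discussion topic."""
--     # Keywords that might indicate topic areas
--     topic_keywords = {
--         'technical': set(['code', 'bug', 'feature', 'development', 'testing']),
--         'business': set(['cost', 'budget', 'client', 'revenue', 'market']),
--         'planning': set(['schedule', 'timeline', 'deadline', 'plan', 'milestone']),
--         'design': set(['ui', 'ux', 'design', 'layout', 'interface']),
--         'team': set(['team', 'staff', 'hire', 'role', 'responsibility'])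
--     }
--
--     # Get current and next topics
--     current_words = set(current_text.lower().split())
--     next_words = set(next_text.lower().split())
--
--     # Determine topic areas for each text
--     current_topics = set()
--     next_topics = set()
--
--     for topic, keywords in topic_keywords.items():
--         if current_words & keywords:
--             current_topics.add(topic)
--         if next_words & keywords:
--             next_topics.add(topic)
--
--     # Check if there's a significant topic shift
--     return bool(next_topics) and not (current_topics & next_topics)
-- ===== SOURCE B (Python) =====
-- def _is_major_topic_shift(current_text: str, next_text: str) -> bool:
--     """Detect major shifts in discussion topic (inverted-index reimplementation)."""
--     groups = {
--         'technical': ['code', 'bug', 'feature', 'development', 'testing'],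
--         'business': ['cost', 'budget', 'client', 'revenue', 'market'],
--         'planning': ['schedule', 'timeline', 'deadline', 'plan', 'milestone'],
--         'design': ['ui', 'ux', 'design', 'layout', 'interface'],
--         'team': ['team', 'staff', 'hire', 'role', 'responsibility'],
--     }
--     # One flat keyword -> topic index (the five groups are disjoint).
--     topic_of = {w: t for t, ws in groups.items() for w in ws}
--     current_topics = {topic_of[w] for w in current_text.lower().split() if w in topic_of}
--     next_topics = {topic_of[w] for w in next_text.lower().split() if w in topic_of}
--     return bool(next_topics) and next_topics.isdisjoint(current_topics)
-- ===== Notes on version B (the rewrite author's own statement) =====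
-- stated objective: idiomatic
-- what changed: Replaces the per-topic loop intersecting the word set with each of the five keyword sets by a single inverted keyword-to-topic dict built once, a per-word dict lookup collecting the topic sets, and set.isdisjoint for the final test.
import Mathlib
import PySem

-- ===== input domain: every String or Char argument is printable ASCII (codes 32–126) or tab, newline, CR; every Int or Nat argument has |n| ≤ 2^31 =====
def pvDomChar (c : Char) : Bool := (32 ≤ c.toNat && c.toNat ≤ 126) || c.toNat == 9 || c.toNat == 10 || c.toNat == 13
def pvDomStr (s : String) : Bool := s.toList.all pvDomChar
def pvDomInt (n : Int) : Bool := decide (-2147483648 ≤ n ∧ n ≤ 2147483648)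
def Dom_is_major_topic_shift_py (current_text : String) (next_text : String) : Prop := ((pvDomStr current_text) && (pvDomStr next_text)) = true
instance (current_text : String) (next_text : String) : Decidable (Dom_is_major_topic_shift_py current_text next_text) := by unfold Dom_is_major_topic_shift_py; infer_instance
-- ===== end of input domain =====

-- B replaces A's per-topic set intersections by one inverted keyword→topic dict and a per-word lookup (idiomatic; return value only, no side effects).

-- ===== PORT A =====
def pvTopicKeywords : PySem.Dict String (PySem.Set String) :=
  PySem.Dict.ofList
    [("technical", PySem.Set.ofList ["code", "bug", "feature", "development", "testing"]),
     ("business", PySem.Set.ofList ["cost", "budget", "client", "revenue", "market"]),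
     ("planning", PySem.Set.ofList ["schedule", "timeline", "deadline", "plan", "milestone"]),
     ("design", PySem.Set.ofList ["ui", "ux", "design", "layout", "interface"]),
     ("team", PySem.Set.ofList ["team", "staff", "hire", "role", "responsibility"])]

def is_major_topic_shift_py (current_text : String) (next_text : String) : Bool :=
  let current_words : PySem.Set String := PySem.Set.ofList (PySem.Str.split₀ (PySem.Str.lower current_text))
  let next_words : PySem.Set String := PySem.Set.ofList (PySem.Str.split₀ (PySem.Str.lower next_text))
  let topics :=
    pvTopicKeywords.items.foldl
      (fun (p : PySem.Set String × PySem.Set String) g =>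
        (if !(PySem.Set.inter current_words g.2).isEmpty then PySem.Set.add p.1 g.1 else p.1,
         if !(PySem.Set.inter next_words g.2).isEmpty then PySem.Set.add p.2 g.1 else p.2))
      (PySem.Set.empty, PySem.Set.empty)
  !topics.2.isEmpty && (PySem.Set.inter topics.1 topics.2).isEmpty

-- ===== PORT B =====
def pvGroups : PySem.Dict String (List String) :=
  PySem.Dict.ofList
    [("technical", ["code", "bug", "feature", "development", "testing"]),
     ("business", ["cost", "budget", "client", "revenue", "market"]),
     ("planning", ["schedule", "timeline", "deadline", "plan", "milestone"]),
     ("design", ["ui", "ux", "design", "layout", "interface"]),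
     ("team", ["team", "staff", "hire", "role", "responsibility"])]

def pvWordTopic : PySem.Dict String String :=
  pvGroups.items.foldl (fun d g => g.2.foldl (fun d w => d.insert w g.1) d) PySem.Dict.empty

def pvTopicsOf (words : List String) : PySem.Set String :=
  words.foldl
    (fun s w =>
      match pvWordTopic.get? w with
      | some t => PySem.Set.add s t
      | none => s)
    PySem.Set.empty

def is_major_topic_shift_py_alt (current_text : String) (next_text : String) : Bool :=
  let current_topics := pvTopicsOf (PySem.Str.split₀ (PySem.Str.lower current_text))
  let next_topics := pvTopicsOf (PySem.Str.split₀ (PySem.Str.lower next_text))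
  !next_topics.isEmpty && PySem.Set.isdisjoint next_topics current_topics

-- ===== PRECONDITION & SPEC =====
def Spec_is_major_topic_shift_py (current_text : String) (next_text : String) (out : Bool) : Prop := out = is_major_topic_shift_py_alt current_text next_text
instance (current_text : String) (next_text : String) (out : Bool) : Decidable (Spec_is_major_topic_shift_py current_text next_text out) := by unfold Spec_is_major_topic_shift_py; infer_instance

-- ===== CLAIM (what is proved, stated in full; the proofs are below) =====
def Claim_equal_is_major_topic_shift_py : Prop := ∀ (current_text : String) (next_text : String), Dom_is_major_topic_shift_py current_text next_text → Spec_is_major_topic_shift_py current_text next_text (is_major_topic_shift_py current_text next_text)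

-- ===== LEMMAS AND PROOFS =====

-- the 25 (keyword, topic) pairs, flat — proof-side only
def pvPairs : List (String × String) :=
  (pvGroups.items).flatMap (fun g => g.2.map (fun w => (w, g.1)))

lemma pv_foldl_pair (cw nw : PySem.Set String) :
    ∀ (l : List (String × PySem.Set String)) (p : PySem.Set String × PySem.Set String),
      l.foldl
        (fun (p : PySem.Set String × PySem.Set String) g =>
          (if !(PySem.Set.inter cw g.2).isEmpty then PySem.Set.add p.1 g.1 else p.1,
           if !(PySem.Set.inter nw g.2).isEmpty then PySem.Set.add p.2 g.1 else p.2)) p =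
      (l.foldl (fun s g => if !(PySem.Set.inter cw g.2).isEmpty then PySem.Set.add s g.1 else s) p.1,
       l.foldl (fun s g => if !(PySem.Set.inter nw g.2).isEmpty then PySem.Set.add s g.1 else s) p.2) := by
  intro l
  induction l with
  | nil => intro p; rfl
  | cons hd tl ih => intro p; simp only [List.foldl_cons]; rw [ih]

lemma pv_mem_foldl_addIf {α β : Type} [BEq α] [LawfulBEq α] (c : β → Bool) (key : β → α) :
    ∀ (l : List β) (s : PySem.Set α) (t : α),
      t ∈ l.foldl (fun s g => if c g then PySem.Set.add s (key g) else s) s ↔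
        t ∈ s ∨ ∃ g ∈ l, c g ∧ t = key g := by
  intro l
  induction l with
  | nil => simp
  | cons hd tl ih =>
    intro s t
    by_cases h : c hd = true <;>
      simp only [List.foldl_cons, if_pos, h, Bool.false_eq_true, if_false, ih,
        PySem.Set.mem_add, List.mem_cons] <;>
      constructor
    · rintro (⟨hs | he⟩ | hg)
      · exact Or.inl hs
      · exact Or.inr ⟨hd, Or.inl rfl, h, he⟩
      · obtain ⟨g, hg1, hg2, hg3⟩ := hg
        exact Or.inr ⟨g, Or.inr hg1, hg2, hg3⟩
    · rintro (hs | ⟨g, hgm | hgm, hg2, hg3⟩)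
      · exact Or.inl (Or.inl hs)
      · exact Or.inl (Or.inr (hgm ▸ hg3))
      · exact Or.inr ⟨g, hgm, hg2, hg3⟩
    · rintro (hs | hg)
      · exact Or.inl hs
      · obtain ⟨g, hg1, hg2, hg3⟩ := hg
        exact Or.inr ⟨g, Or.inr hg1, hg2, hg3⟩
    · rintro (hs | ⟨g, hgm | hgm, hg2, hg3⟩)
      · exact Or.inl hs
      · exact absurd (hgm ▸ hg2) (by simpa using h)
      · exact Or.inr ⟨g, hgm, hg2, hg3⟩

lemma pv_mem_topicsOf (W : List String) (t : String) :
    t ∈ pvTopicsOf W ↔ ∃ w ∈ W, pvWordTopic.get? w = some t := by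
  have gen : ∀ (l : List String) (s : PySem.Set String),
      t ∈ l.foldl
          (fun s w =>
            match pvWordTopic.get? w with
            | some u => PySem.Set.add s u
            | none => s) s ↔
        t ∈ s ∨ ∃ w ∈ l, pvWordTopic.get? w = some t := by
    intro l
    induction l with
    | nil => simp
    | cons hd tl ih =>
      intro s
      cases h : pvWordTopic.get? hd with
      | none =>
        simp only [List.foldl_cons, h, ih, List.mem_cons]
        constructor
        · rintro (hs | ⟨w, hw, hg⟩)
          · exact Or.inl hs
          · exact Or.inr ⟨w, Or.inr hw, hg⟩
        · rintro (hs | ⟨w, hw | hw, hg⟩)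
          · exact Or.inl hs
          · exact absurd (hw ▸ hg) (by simp [h])
          · exact Or.inr ⟨w, hw, hg⟩
      | some u =>
        simp only [List.foldl_cons, h, ih, PySem.Set.mem_add, List.mem_cons]
        constructor
        · rintro (⟨hs | he⟩ | ⟨w, hw, hg⟩)
          · exact Or.inl hs
          · exact Or.inr ⟨hd, Or.inl rfl, by rw [h, he]⟩
          · exact Or.inr ⟨w, Or.inr hw, hg⟩
        · rintro (hs | ⟨w, hw | hw, hg⟩)
          · exact Or.inl (Or.inl hs)
          · refine Or.inl (Or.inr ?_)
            have := hw ▸ hg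
            rw [h] at this
            exact (Option.some.injEq _ _ ▸ this).symm
          · exact Or.inr ⟨w, hw, hg⟩
  simpa [pvTopicsOf] using gen W PySem.Set.empty

lemma pv_get?_wordTopic (w t : String) :
    pvWordTopic.get? w = some t ↔ (w, t) ∈ pvPairs := by
  rw [PySem.Dict.get?_eq_some_iff_mem_items _ _ _ (by decide)]
  rw [show pvWordTopic.items = pvPairs from by decide]

lemma pv_items_eq : pvTopicKeywords.items = pvGroups.items := by decide

lemma pv_memA_iff (W : List String) (t : String) :
    t ∈ pvTopicKeywords.items.foldl
        (fun s g => if !(PySem.Set.inter (PySem.Set.ofList W) g.2).isEmpty then PySem.Set.add s g.1 else s)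
        PySem.Set.empty ↔
      ∃ p ∈ pvPairs, p.1 ∈ W ∧ t = p.2 := by
  rw [pv_mem_foldl_addIf]
  have hne : ∀ (kws : List String),
      (!(PySem.Set.inter (PySem.Set.ofList W) kws).isEmpty) = true ↔ ∃ k ∈ kws, k ∈ W := by
    intro kws
    simp only [Bool.not_eq_eq_eq_not, Bool.not_true, List.isEmpty_eq_false_iff_exists_mem]
    constructor
    · rintro ⟨x, hx⟩
      rw [PySem.Set.mem_inter _ _ _] at hx
      exact ⟨x, hx.2, (PySem.Set.mem_ofList _ _).1 hx.1⟩
    · rintro ⟨k, hk, hkW⟩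
      exact ⟨k, (PySem.Set.mem_inter _ _ _).2 ⟨(PySem.Set.mem_ofList _ _).2 hkW, hk⟩⟩
  simp only [hne, pv_items_eq, pvPairs, List.mem_flatMap, List.mem_map,
    PySem.Set.empty, List.not_mem_nil, false_or]
  constructor
  · rintro ⟨g, hg, ⟨k, hk, hkW⟩, ht⟩
    exact ⟨(k, g.1), ⟨g, hg, k, hk, rfl⟩, hkW, ht⟩
  · rintro ⟨p, ⟨g, hg, k, hk, hpk⟩, hpW, ht⟩
    subst hpk
    exact ⟨g, hg, ⟨k, hk, hpW⟩, ht⟩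

lemma pv_topics_eq_mem (W : List String) (t : String) :
    t ∈ pvTopicKeywords.items.foldl
        (fun s g => if !(PySem.Set.inter (PySem.Set.ofList W) g.2).isEmpty then PySem.Set.add s g.1 else s)
        PySem.Set.empty ↔ t ∈ pvTopicsOf W := by
  rw [pv_memA_iff, pv_mem_topicsOf]
  constructor
  · rintro ⟨p, hp, hw, ht⟩
    exact ⟨p.1, hw, (pv_get?_wordTopic p.1 t).2 (ht ▸ hp)⟩
  · rintro ⟨w, hw, hg⟩
    exact ⟨(w, t), (pv_get?_wordTopic w t).1 hg, hw, rfl⟩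

-- ===== VERDICT (by name: the statement is the Claim_ definition above) =====
set_option maxHeartbeats 4000000 in
theorem is_major_topic_shift_py_spec : Claim_equal_is_major_topic_shift_py := by
  intro ct nt _
  unfold Spec_is_major_topic_shift_py is_major_topic_shift_py is_major_topic_shift_py_alt
  simp only [pv_foldl_pair]
  have hc := pv_topics_eq_mem (PySem.Str.split₀ (PySem.Str.lower ct))
  have hn := pv_topics_eq_mem (PySem.Str.split₀ (PySem.Str.lower nt))
  congr 1
  · rw [Bool.eq_iff_iff]
    simp only [Bool.not_eq_eq_eq_not, Bool.not_true, List.isEmpty_eq_false_iff_exists_mem]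
    constructor
    · rintro ⟨t, ht⟩; exact ⟨t, (hn t).1 ht⟩
    · rintro ⟨t, ht⟩; exact ⟨t, (hn t).2 ht⟩
  · rw [Bool.eq_iff_iff]
    rw [List.isEmpty_iff, List.eq_nil_iff_forall_not_mem, PySem.Set.isdisjoint_iff _ _]
    constructor
    · intro h t htn htc
      exact h t ((PySem.Set.mem_inter _ _ _).2 ⟨(hc t).2 htc, (hn t).2 htn⟩)
    · intro h t ht
      have := (PySem.Set.mem_inter _ _ _).1 ht
      exact h t ((hn t).1 this.2) ((hc t).1 this.1)
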